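-- pv_equiv track=rewrite | github.com/don-fink/NoteBook | ui_richtext.py | _letters_to_index
-- ===== SOURCE A (Python) =====
-- def _letters_to_index(letters: str) -> int:
--     """Convert spreadsheet-like column letters (A, B, ... Z, AA, AB, ...) to 0-based index."""
--     s = (letters or "").strip().upper()
--     if not s or not s.isalpha():
--         return -1
--     idx = 0
--     for ch in s:
--         idx = idx * 26 + (ord(ch) - ord('A') + 1)
--     return idx - 1
-- ===== SOURCE B (Python) =====
-- def _letters_to_index(letters: str) -> int:
--     """Convert spreadsheet-like column letters (A, B, ... Z, AA, AB, ...) to 0-based index."""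
--     s = (letters or "").strip().upper()
--     if not s or not s.isalpha():
--         return -1
--     n = len(s)
--     pows = [1]
--     for _ in range(1, n):
--         pows.append(pows[-1] * 26)
--     total = sum((ord(ch) - ord('A') + 1) * p for ch, p in zip(s, reversed(pows)))
--     return total - 1
-- ===== Notes on version B (the rewrite author's own statement) =====
-- stated objective: alternative
-- what changed: Replaces A's stateful left-to-right Horner fold with staged passes: build the table of place values 26**k once, then sum each letter's 1-based digit times its place value from the reversed table.
import Mathlib
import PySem

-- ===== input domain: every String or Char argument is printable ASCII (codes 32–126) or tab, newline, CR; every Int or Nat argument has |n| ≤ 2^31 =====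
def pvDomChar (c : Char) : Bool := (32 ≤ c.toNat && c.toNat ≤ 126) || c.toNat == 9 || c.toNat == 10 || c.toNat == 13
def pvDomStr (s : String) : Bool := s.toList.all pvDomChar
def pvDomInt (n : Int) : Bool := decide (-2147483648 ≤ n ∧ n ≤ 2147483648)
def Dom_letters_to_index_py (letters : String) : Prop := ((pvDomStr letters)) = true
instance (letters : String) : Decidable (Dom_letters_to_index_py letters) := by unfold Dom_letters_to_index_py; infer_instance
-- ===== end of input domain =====

-- ===== PORT A =====
-- B change, honestly: same validation, but B works in staged passes — build the table of
-- place values 26^k once, then sum digit*place over the letters zipped with the reversed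
-- table — instead of A's single stateful Horner fold (objective: alternative).
def letters_to_index_py (letters : String) : Int :=
  let s := PySem.Chars.upper (PySem.Chars.strip letters.toList)
  if s.isEmpty || !(PySem.Chars.strIsalpha s) then -1
  else (s.foldl (fun idx ch => idx * 26 + ((ch.toNat : Int) - 65 + 1)) 0) - 1

-- ===== PORT B =====
-- the Python loop 'pows = [1]; for _ in range(1, n): pows.append(pows[-1] * 26)':
-- emits k place values front to back, carrying the running power
def pvPowsFrom (p : Int) : Nat → List Int
  | 0 => []
  | k + 1 => p :: pvPowsFrom (p * 26) k

def letters_to_index_py_alt (letters : String) : Int :=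
  let s := PySem.Chars.upper (PySem.Chars.strip letters.toList)
  if s.isEmpty || !(PySem.Chars.strIsalpha s) then -1
  else
    let pows := pvPowsFrom 1 s.length
    (List.zipWith (fun ch p => ((ch.toNat : Int) - 65 + 1) * p) s pows.reverse).sum - 1

-- ===== PRECONDITION & SPEC =====
def Spec_letters_to_index_py (letters : String) (out : Int) : Prop := out = letters_to_index_py_alt letters
instance (letters : String) (out : Int) : Decidable (Spec_letters_to_index_py letters out) := by unfold Spec_letters_to_index_py; infer_instance

-- ===== CLAIM (what is proved, stated in full; the proofs are below) =====
def Claim_equal_letters_to_index_py : Prop := ∀ (letters : String), Dom_letters_to_index_py letters → Spec_letters_to_index_py letters (letters_to_index_py letters)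

-- ===== LEMMAS AND PROOFS =====

-- the iteratively built table is the list of powers p*26^k, k = 0..n-1
theorem pvPowsFrom_eq_map (n : Nat) (p : Int) :
    pvPowsFrom p n = (List.range n).map (fun k => p * (26 : Int) ^ k) := by
  induction n generalizing p with
  | zero => rfl
  | succ n ih =>
      rw [pvPowsFrom, ih, List.range_succ_eq_map, List.map_cons, List.map_map]
      simp only [pow_zero, mul_one, List.cons.injEq, true_and]
      refine List.map_congr_left ?_
      intro k _
      simp [Function.comp, pow_succ]
      ring

-- A's Horner fold from accumulator a equals a*26^n plus B's positional sum.
theorem horner_eq_possum (l : List Char) (a : Int) :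
    List.foldl (fun idx ch => idx * 26 + ((ch.toNat : Int) - 65 + 1)) a l
      = a * (26 : Int) ^ l.length
        + (List.zipWith (fun ch k => ((ch.toNat : Int) - 65 + 1) * (26 : Int) ^ k)
            l (List.range l.length).reverse).sum := by
  induction l generalizing a with
  | nil => simp
  | cons c t ih =>
      have hr : (List.range (t.length + 1)).reverse = t.length :: (List.range t.length).reverse := by
        simp [List.range_succ]
      simp only [List.foldl_cons, List.length_cons, hr, List.zipWith_cons_cons, List.sum_cons, ih]
      ring

-- ===== VERDICT (by name: the statement is the Claim_ definition above) =====
theorem letters_to_index_py_spec : Claim_equal_letters_to_index_py := by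
  intro letters _
  unfold Spec_letters_to_index_py letters_to_index_py letters_to_index_py_alt
  simp only []
  split_ifs with h
  · rfl
  · rw [pvPowsFrom_eq_map, ← List.map_reverse, List.zipWith_map_right, horner_eq_possum]
    simp only [one_mul]
    ring
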